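-- pv_equiv track=rewrite | github.com/jamestcole/AOCwinter25 | day7_pt2.py | count_timelines
-- ===== SOURCE A (Python) =====
-- def count_timelines(grid):
--     rows = len(grid)
--     cols = len(grid[0]) if rows else 0
--     if rows == 0 or cols == 0:
--         return 0
--
--     # find S
--     s_row = s_col = None
--     for r in range(rows):
--         c = grid[r].find("S")
--         if c != -1:
--             s_row, s_col = r, c
--             break
--     if s_row is None:
--         raise ValueError("No 'S' found in grid")
--
--     # particle starts moving downward from just below S
--     ways = {s_col: 1}
--     exited = 0
--
--     for r in range(s_row + 1, rows):
--         if not ways: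
--             break
--
--         next_ways = {}
--         row = grid[r]
--
--         for c, w in ways.items():
--             if c < 0 or c >= cols:
--                 exited += w
--                 continue
--
--             if row[c] == "^":
--                 # split: go down-left and down-right
--                 for nc in (c - 1, c + 1):
--                     if 0 <= nc < cols:
--                         next_ways[nc] = next_ways.get(nc, 0) + w
--                     else:
--                         exited += w
--             else:
--                 # continue straight down
--                 next_ways[c] = next_ways.get(c, 0) + w
--
--         ways = next_ways
--
--     # any timelines still in-grid after the last row exit out the bottom
--     exited += sum(ways.values())
--     return exited
-- ===== SOURCE B (Python) =====
-- def count_timelines(grid):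
--     rows = len(grid)
--     cols = len(grid[0]) if rows else 0
--     if rows == 0 or cols == 0:
--         return 0
--
--     # find S
--     s_row = s_col = None
--     for r in range(rows):
--         c = grid[r].find("S")
--         if c != -1:
--             s_row, s_col = r, c
--             break
--     if s_row is None:
--         raise ValueError("No 'S' found in grid")
--
--     # bottom-up DP: table[c] = number of exit timelines of a particle about to
--     # enter the row below the one just processed, at column c; below the grid
--     # every particle exits exactly once.
--     table = [1] * cols
--     for r in range(rows - 1, s_row, -1):
--         row = grid[r]
--         table = [
--             ((table[c - 1] if c - 1 >= 0 else 1) + (table[c + 1] if c + 1 < cols else 1))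
--             if row[c] == "^" else table[c]
--             for c in range(cols)
--         ]
--     return table[s_col]
-- ===== Notes on version B (the rewrite author's own statement) =====
-- stated objective: alternative
-- what changed: A simulates particles top-down with a dict of column weights and an 'exited' accumulator; B computes the same count bottom-up with a dense per-column DP table (exit counts of a single particle), returning table[s_col].
-- outside the precondition, e.g. on count_timelines(['S.', '.']): A returns 1, B raises IndexError
import Mathlib
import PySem

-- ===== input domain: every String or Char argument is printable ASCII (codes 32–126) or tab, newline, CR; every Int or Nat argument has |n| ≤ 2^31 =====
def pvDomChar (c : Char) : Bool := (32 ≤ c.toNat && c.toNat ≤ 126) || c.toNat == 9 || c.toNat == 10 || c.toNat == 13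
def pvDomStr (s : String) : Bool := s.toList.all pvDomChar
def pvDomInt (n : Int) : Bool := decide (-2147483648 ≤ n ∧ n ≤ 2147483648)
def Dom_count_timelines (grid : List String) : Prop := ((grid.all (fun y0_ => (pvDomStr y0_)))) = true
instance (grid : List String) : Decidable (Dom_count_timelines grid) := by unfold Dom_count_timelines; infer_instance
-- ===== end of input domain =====

-- B replaces A's forward dict-of-splitting-ways simulation by a backward dense-table DP over whole
-- rows (alternative decomposition, same cost class); return values agree on Pre_, proved below.

-- ===== PORT A =====
-- the "find S" loop: for r in range(rows): c = grid[r].find("S"); break when c != -1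
def pvFindS : List String → Nat → Option (Nat × Int)
  | [], _ => none
  | row :: rest, r =>
    let c := PySem.Str.find row "S"
    if c ≠ -1 then some (r, c) else pvFindS rest (r + 1)

-- body of "for c, w in ways.items()": state is (exited, next_ways)
def pvStepCellA (cols : Int) (row : String) (st : Int × PySem.Dict Int Int) (cw : Int × Int) :
    Int × PySem.Dict Int Int :=
  let exited := st.1
  let next := st.2
  let c := cw.1
  let w := cw.2
  if c < 0 ∨ cols ≤ c then (exited + w, next)
  else
    match PySem.Str.pyGet? row c with
    | some ch =>
      if ch = '^' then
        let st1 : Int × PySem.Dict Int Int :=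
          if 0 ≤ c - 1 ∧ c - 1 < cols then (exited, next.insert (c - 1) (next.getD (c - 1) 0 + w))
          else (exited + w, next)
        if 0 ≤ c + 1 ∧ c + 1 < cols then (st1.1, st1.2.insert (c + 1) (st1.2.getD (c + 1) 0 + w))
        else (st1.1 + w, st1.2)
      else (exited, next.insert c (next.getD c 0 + w))
    | none => (exited, next)

-- "for r in range(s_row + 1, rows)" over the rows below S, with the "if not ways: break",
-- finishing with "exited += sum(ways.values())"
def pvRunRowsA (cols : Int) : List String → PySem.Dict Int Int → Int → Int
  | [], ways, exited => exited + ways.values.sum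
  | row :: rest, ways, exited =>
    if ways.items.isEmpty then exited + ways.values.sum
    else
      let st := ways.items.foldl (pvStepCellA cols row) (exited, PySem.Dict.empty)
      pvRunRowsA cols rest st.2 st.1

def count_timelines (grid : List String) : Int :=
  let rows := grid.length
  let cols : Int := if rows = 0 then 0 else PySem.Str.len grid.headI
  if rows = 0 ∨ cols = 0 then 0
  else
    match pvFindS grid 0 with
    | none => 0
    | some sc =>
      pvRunRowsA cols (grid.drop (sc.1 + 1)) (PySem.Dict.ofList [(sc.2, 1)]) 0

-- ===== PORT B =====
-- Source B's identical S search
def pvFindS_alt : List String → Nat → Option (Nat × Int)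
  | [], _ => none
  | row :: rest, r =>
    let c := PySem.Str.find row "S"
    if c ≠ -1 then some (r, c) else pvFindS_alt rest (r + 1)

-- the list comprehension of Source B: one DP row computed from the row below it
def pvStepRowB (cols : Int) (row : String) (table : List Int) : List Int :=
  (PySem.List.pyRange 0 cols 1).map (fun c =>
    match PySem.Str.pyGet? row c with
    | some ch =>
      if ch = '^' then
        (if 0 ≤ c - 1 then table.getD (c - 1).toNat 0 else 1) +
        (if c + 1 < cols then table.getD (c + 1).toNat 0 else 1)
      else table.getD c.toNat 0
    | none => table.getD c.toNat 0)

def count_timelines_alt (grid : List String) : Int :=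
  let rows := grid.length
  let cols : Int := if rows = 0 then 0 else PySem.Str.len grid.headI
  if rows = 0 ∨ cols = 0 then 0
  else
    match pvFindS_alt grid 0 with
    | none => 0
    | some sc =>
      let table := (grid.drop (sc.1 + 1)).foldr (pvStepRowB cols) (List.replicate cols.toNat 1)
      table.getD sc.2.toNat 0

-- ===== PRECONDITION & SPEC =====
-- Pre_ excludes grids with no 'S' (A raises ValueError) and ragged grids where the first 'S' sits
-- beyond the first row's width or some row below the first 'S' row is narrower than the first row:
-- there B's whole-row DP raises IndexError, while A may raise too or happen to return.
def Pre_count_timelines (grid : List String) : Prop :=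
  grid = [] ∨ grid.headI.toList.length = 0 ∨
  (grid.findIdx (fun row => PySem.Str.find row "S" != -1) < grid.length ∧
   PySem.Str.find (grid.getD (grid.findIdx (fun row => PySem.Str.find row "S" != -1)) "") "S"
     < grid.headI.toList.length ∧
   ∀ row ∈ grid.drop (grid.findIdx (fun row => PySem.Str.find row "S" != -1) + 1),
     grid.headI.toList.length ≤ row.toList.length)
instance (grid : List String) : Decidable (Pre_count_timelines grid) := by
  unfold Pre_count_timelines; infer_instance
def pvWitness_count_timelines : List String := ["S.", ".^"]

def Spec_count_timelines (grid : List String) (out : Int) : Prop := out = count_timelines_alt grid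
instance (grid : List String) (out : Int) : Decidable (Spec_count_timelines grid out) := by unfold Spec_count_timelines; infer_instance

-- ===== CLAIM (what is proved, stated in full; the proofs are below) =====
def Claim_equal_count_timelines : Prop := ∀ (grid : List String), Dom_count_timelines grid → Pre_count_timelines grid → Spec_count_timelines grid (count_timelines grid)

-- ===== LEMMAS AND PROOFS =====

-- the common semantics: pvExits cols L c = number of exit timelines of one particle about to
-- enter the remaining rows L at column c; pvTot = its weighted total over a ways dict
def pvExits (cols : Int) : List String → Int → Int
  | [], _ => 1
  | row :: rest, c =>
    match PySem.Str.pyGet? row c with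
    | some ch =>
      if ch = '^' then
        (if 0 ≤ c - 1 ∧ c - 1 < cols then pvExits cols rest (c - 1) else 1) +
        (if 0 ≤ c + 1 ∧ c + 1 < cols then pvExits cols rest (c + 1) else 1)
      else pvExits cols rest c
    | none => pvExits cols rest c

def pvTot (cols : Int) (L : List String) (ps : List (Int × Int)) : Int :=
  (ps.map (fun p => p.2 * pvExits cols L p.1)).sum

theorem pvGet_eq (s : String) (c : Int) (h0 : 0 ≤ c) :
    PySem.Str.pyGet? s c = s.toList[c.toNat]? := by
  have h : c = ((c.toNat : Nat) : Int) := by omega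
  rw [h, PySem.Str.pyGet?_natCast]
  congr 1

theorem pvGet_some (s : String) (c : Int) (h0 : 0 ≤ c) (h1 : c < (s.toList.length : Int)) :
    ∃ ch, PySem.Str.pyGet? s c = some ch := by
  rw [pvGet_eq s c h0]
  exact ⟨s.toList[c.toNat]'(by omega), List.getElem?_eq_getElem (by omega)⟩

theorem pvTot_nil (cols : Int) (L : List String) : pvTot cols L [] = 0 := rfl

theorem pvTot_cons (cols : Int) (L : List String) (p : Int × Int) (ps : List (Int × Int)) :
    pvTot cols L (p :: ps) = p.2 * pvExits cols L p.1 + pvTot cols L ps := by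
  simp [pvTot]

theorem pvTot_append (cols : Int) (L : List String) (xs ys : List (Int × Int)) :
    pvTot cols L (xs ++ ys) = pvTot cols L xs + pvTot cols L ys := by
  simp [pvTot]

theorem pv_sum_update (l : List Int) (hnd : l.Nodup) (k : Int) (hk : k ∈ l)
    (f g : Int → Int) (hagree : ∀ x ∈ l, x ≠ k → f x = g x) :
    (l.map f).sum = (l.map g).sum + (f k - g k) := by
  induction l with
  | nil => simp at hk
  | cons x t ih =>
    rcases List.mem_cons.mp hk with rfl | hkt
    · have hnk : ∀ y ∈ t, f y = g y := by
        intro y hy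
        exact hagree y (List.mem_cons_of_mem _ hy) (fun h => (List.nodup_cons.mp hnd).1 (h ▸ hy))
      simp [List.map_congr_left hnk]; ring
    · have hx : f x = g x := hagree x (List.mem_cons_self) (fun h => (List.nodup_cons.mp hnd).1 (h ▸ hkt))
      have := ih (List.nodup_cons.mp hnd).2 hkt (fun y hy hyk => hagree y (List.mem_cons_of_mem _ hy) hyk)
      simp [hx, this]; ring

theorem pvTot_insert (cols : Int) (L : List String) (d : PySem.Dict Int Int)
    (hnd : d.keys.Nodup) (k w : Int) :
    pvTot cols L (d.insert k (d.getD k 0 + w)).items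
      = pvTot cols L d.items + w * pvExits cols L k := by
  by_cases hcon : d.contains k
  · rw [PySem.Dict.items_insert_of_contains d _ hcon]
    rw [PySem.Dict.items_eq_map_keys d hnd 0]
    have hk : k ∈ d.keys := (PySem.Dict.contains_iff_mem_keys d k).mp hcon
    unfold pvTot
    rw [List.map_map, List.map_map, List.map_map]
    have h1 : List.map (((fun p => p.2 * pvExits cols L p.1) ∘ fun p => if (p.1 == k) = true then (k, d.getD k 0 + w) else p) ∘ fun k' => (k', d.getD k' 0)) d.keys
        = List.map (fun k' => if k' = k then (d.getD k 0 + w) * pvExits cols L k else d.getD k' 0 * pvExits cols L k') d.keys := by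
      apply List.map_congr_left; intro x hx
      by_cases hxk : x = k <;> simp [hxk]
    have h2 : List.map ((fun p => p.2 * pvExits cols L p.1) ∘ fun k' => (k', d.getD k' 0)) d.keys
        = List.map (fun k' => d.getD k' 0 * pvExits cols L k') d.keys := rfl
    rw [h1, h2, pv_sum_update d.keys hnd k hk _ (fun k' => d.getD k' 0 * pvExits cols L k') (by intro x hx hxk; simp [hxk])]
    simp
    ring
  · rw [PySem.Dict.items_insert_of_not_contains d _ (by simpa using hcon)]
    rw [pvTot_append, PySem.Dict.getD_of_not_contains d 0 (by simpa using hcon)]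
    simp [pvTot]

theorem pvStep_one (cols : Int) (row : String) (rest : List String)
    (hrow : cols.toNat ≤ row.toList.length)
    (c w : Int) (hc0 : 0 ≤ c) (hc1 : c < cols)
    (ex0 : Int) (d0 : PySem.Dict Int Int) (hnd : d0.keys.Nodup)
    (hb : ∀ p ∈ d0.items, 0 ≤ p.1 ∧ p.1 < cols) :
    (pvStepCellA cols row (ex0, d0) (c, w)).1
        + pvTot cols rest (pvStepCellA cols row (ex0, d0) (c, w)).2.items
      = ex0 + pvTot cols rest d0.items + w * pvExits cols (row :: rest) c
    ∧ (pvStepCellA cols row (ex0, d0) (c, w)).2.keys.Nodup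
    ∧ ∀ p ∈ (pvStepCellA cols row (ex0, d0) (c, w)).2.items, 0 ≤ p.1 ∧ p.1 < cols := by
  obtain ⟨ch, hch⟩ := pvGet_some row c hc0 (by omega)
  simp only [pvStepCellA, pvExits, hch]
  rw [if_neg (by omega : ¬(c < 0 ∨ cols ≤ c))]
  by_cases hhat : ch = '^'
  · rw [if_pos hhat, if_pos hhat]
    split_ifs with hL hR hR
    · refine ⟨?_, ?_, ?_⟩
      · rw [pvTot_insert cols rest _ (PySem.Dict.nodup_keys_insert _ _ _ hnd) (c + 1) w,
            pvTot_insert cols rest d0 hnd (c - 1) w]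
        ring
      · exact PySem.Dict.nodup_keys_insert _ _ _ (PySem.Dict.nodup_keys_insert _ _ _ hnd)
      · intro p hp
        rcases (PySem.Dict.mem_items_insert _ _ _ _).mp hp with rfl | ⟨hp2, _⟩
        · simp; omega
        · rcases (PySem.Dict.mem_items_insert _ _ _ _).mp hp2 with rfl | ⟨hp3, _⟩
          · simp; omega
          · exact hb p hp3
    · refine ⟨?_, PySem.Dict.nodup_keys_insert _ _ _ hnd, ?_⟩
      · dsimp only; rw [pvTot_insert cols rest d0 hnd (c + 1) w]; ring
      · intro p hp
        rcases (PySem.Dict.mem_items_insert _ _ _ _).mp hp with rfl | ⟨hp2, _⟩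
        · simp; omega
        · exact hb p hp2
    · refine ⟨?_, PySem.Dict.nodup_keys_insert _ _ _ hnd, ?_⟩
      · dsimp only; rw [pvTot_insert cols rest d0 hnd (c - 1) w]; ring
      · intro p hp
        rcases (PySem.Dict.mem_items_insert _ _ _ _).mp hp with rfl | ⟨hp2, _⟩
        · simp; omega
        · exact hb p hp2
    · exact ⟨by ring, hnd, hb⟩
  · rw [if_neg hhat, if_neg hhat]
    refine ⟨?_, PySem.Dict.nodup_keys_insert _ _ _ hnd, ?_⟩
    · rw [pvTot_insert cols rest d0 hnd c w]; ring
    · intro p hp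
      rcases (PySem.Dict.mem_items_insert _ _ _ _).mp hp with rfl | ⟨hp2, _⟩
      · simp; omega
      · exact hb p hp2

theorem pvFold_inner (cols : Int) (row : String) (rest : List String)
    (hrow : cols.toNat ≤ row.toList.length) :
    ∀ (ps : List (Int × Int)), (∀ p ∈ ps, 0 ≤ p.1 ∧ p.1 < cols) →
    ∀ (ex0 : Int) (d0 : PySem.Dict Int Int), d0.keys.Nodup →
      (∀ p ∈ d0.items, 0 ≤ p.1 ∧ p.1 < cols) →
      (ps.foldl (pvStepCellA cols row) (ex0, d0)).1
          + pvTot cols rest (ps.foldl (pvStepCellA cols row) (ex0, d0)).2.items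
        = ex0 + pvTot cols rest d0.items + pvTot cols (row :: rest) ps
      ∧ (ps.foldl (pvStepCellA cols row) (ex0, d0)).2.keys.Nodup
      ∧ (∀ p ∈ (ps.foldl (pvStepCellA cols row) (ex0, d0)).2.items, 0 ≤ p.1 ∧ p.1 < cols) := by
  intro ps
  induction ps with
  | nil => intro _ ex0 d0 hnd hb; exact ⟨by simp [pvTot_nil], hnd, hb⟩
  | cons p ps ih =>
    intro hps ex0 d0 hnd hb
    have hpb := hps p (List.mem_cons_self)
    obtain ⟨h1, h2, h3⟩ := pvStep_one cols row rest hrow p.1 p.2 hpb.1 hpb.2 ex0 d0 hnd hb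
    have hstep : pvStepCellA cols row (ex0, d0) p = pvStepCellA cols row (ex0, d0) (p.1, p.2) := by rfl
    rw [List.foldl_cons, hstep]
    obtain ⟨ih1, ih2, ih3⟩ := ih (fun q hq => hps q (List.mem_cons_of_mem _ hq))
      (pvStepCellA cols row (ex0, d0) (p.1, p.2)).1
      (pvStepCellA cols row (ex0, d0) (p.1, p.2)).2 h2 h3
    refine ⟨?_, by simpa using ih2, by simpa using ih3⟩
    rw [pvTot_cons]
    have : ((pvStepCellA cols row (ex0, d0) (p.1, p.2)).1, (pvStepCellA cols row (ex0, d0) (p.1, p.2)).2) = pvStepCellA cols row (ex0, d0) (p.1, p.2) := by rfl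
    rw [this] at ih1
    linarith

theorem pvValues_sum (cols : Int) (d : PySem.Dict Int Int) :
    d.values.sum = pvTot cols [] d.items := by
  simp [pvTot, pvExits, PySem.Dict.values]

theorem pvRunRowsA_eq (cols : Int) (L : List String)
    (hL : ∀ s ∈ L, cols.toNat ≤ s.toList.length) :
    ∀ (ways : PySem.Dict Int Int) (exited : Int), ways.keys.Nodup →
      (∀ p ∈ ways.items, 0 ≤ p.1 ∧ p.1 < cols) →
      pvRunRowsA cols L ways exited = exited + pvTot cols L ways.items := by
  induction L with
  | nil => intro ways exited _ _; simp [pvRunRowsA, pvValues_sum cols ways]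
  | cons row rest ih =>
    intro ways exited hnd hb
    rw [pvRunRowsA]
    by_cases hemp : ways.items.isEmpty
    · rw [if_pos hemp, pvValues_sum cols ways]
      rw [List.isEmpty_iff.mp hemp]
      simp [pvTot_nil]
    · rw [if_neg hemp]
      obtain ⟨h1, h2, h3⟩ := pvFold_inner cols row rest
        (hL row (List.mem_cons_self)) ways.items hb exited PySem.Dict.empty
        PySem.Dict.nodup_keys_empty (by intro p hp; simp [PySem.Dict.empty] at hp)
      rw [ih (fun s hs => hL s (List.mem_cons_of_mem _ hs)) _ _ h2 h3]
      have hemp2 : pvTot cols rest (PySem.Dict.empty : PySem.Dict Int Int).items = 0 := rfl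
      rw [hemp2] at h1
      linarith

theorem pvFoldrB_eq (cols : Int) (hc : 0 < cols) (L : List String)
    (hL : ∀ s ∈ L, cols.toNat ≤ s.toList.length) :
    ∀ (c : Int), 0 ≤ c → c < cols →
    (L.foldr (pvStepRowB cols) (List.replicate cols.toNat 1)).getD c.toNat 0
      = pvExits cols L c := by
  induction L with
  | nil =>
    intro c h0 h1
    simp [pvExits]
    exact List.getD_replicate 1 (by omega)
  | cons row rest ih =>
    intro c h0 h1
    rw [List.foldr_cons, pvStepRowB]
    have hcast : cols = ((cols.toNat : Nat) : Int) := by omega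
    rw [hcast, PySem.List.pyRange_zero_natCast, List.map_map]
    rw [List.getD_eq_getElem?_getD, List.getElem?_map, List.getElem?_range (by omega)]
    simp only [Option.map_some, Option.getD_some, Function.comp]
    have hcc : ((c.toNat : Nat) : Int) = c := by omega
    rw [hcc, ← hcast]
    obtain ⟨ch, hch⟩ := pvGet_some row c h0 (by have := hL row (List.mem_cons_self); omega)
    rw [pvExits, hch]
    dsimp only
    have ihr := fun c h0 h1 => ih (fun s hs => hL s (List.mem_cons_of_mem _ hs)) c h0 h1
    by_cases hhat : ch = '^'
    · rw [if_pos hhat, if_pos hhat]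
      congr 1
      · by_cases hdL : 0 ≤ c - 1
        · rw [if_pos hdL, if_pos ⟨hdL, by omega⟩, ihr (c - 1) hdL (by omega)]
        · rw [if_neg hdL, if_neg (by omega)]
      · by_cases hdR : c + 1 < cols
        · rw [if_pos hdR, if_pos ⟨by omega, hdR⟩, ihr (c + 1) (by omega) hdR]
        · rw [if_neg hdR, if_neg (by omega)]
    · rw [if_neg hhat, if_neg hhat, ihr c h0 h1]

theorem pvFindS_idx (L : List String) (r : Nat) :
    (L.findIdx (fun row => PySem.Str.find row "S" != -1) < L.length →
      pvFindS L r = some (r + L.findIdx (fun row => PySem.Str.find row "S" != -1),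
        PySem.Str.find (L.getD (L.findIdx (fun row => PySem.Str.find row "S" != -1)) "") "S"))
    ∧ (¬ L.findIdx (fun row => PySem.Str.find row "S" != -1) < L.length → pvFindS L r = none) := by
  induction L generalizing r with
  | nil => exact ⟨by intro h; simp at h, fun _ => rfl⟩
  | cons row rest ih =>
    by_cases hp : PySem.Str.find row "S" != -1
    · refine ⟨?_, ?_⟩ <;> rw [List.findIdx_cons, hp]
      · intro _
        simp only [cond_true, pvFindS]
        rw [if_pos (by simpa using hp)]
        simp
      · intro h; simp at h
    · have hp' : (PySem.Str.find row "S" != -1) = false := by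
        simpa using hp
      have hstep : pvFindS (row :: rest) r = pvFindS rest (r + 1) := by
        simp only [pvFindS]
        rw [if_neg (by simpa using hp)]
      refine ⟨?_, ?_⟩ <;> rw [List.findIdx_cons, hp'] <;> simp only [cond_false]
      · intro h
        have hlt : rest.findIdx (fun row => PySem.Str.find row "S" != -1) < rest.length := by
          rw [List.length_cons] at h; omega
        rw [hstep, (ih (r + 1)).1 hlt]
        simp
        omega
      · intro h
        rw [hstep, (ih (r + 1)).2 (by rw [List.length_cons] at h; omega)]

theorem pvFind_bounds (row : String) (sc : Int)
    (h1 : PySem.Str.find row "S" = sc) (h2 : sc ≠ -1) :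
    0 ≤ sc ∧ sc < (row.toList.length : Int) := by
  have h1' : PySem.Chars.find row.toList ['S'] = sc := by simpa using h1
  have hge : -1 ≤ sc := h1' ▸ PySem.Chars.neg_one_le_find row.toList ['S']
  have h0 : 0 ≤ sc := by omega
  have hpre := (PySem.Chars.find_spec (s := row.toList) (sub := ['S']) (by omega)).1
  rw [h1'] at hpre
  have hne : List.drop sc.toNat row.toList ≠ [] := by
    intro hnil
    rw [hnil] at hpre
    exact absurd (List.prefix_nil.mp hpre) (by simp)
  have hlt : ¬ (row.toList.length ≤ sc.toNat) := fun h => hne (List.drop_eq_nil_iff.mpr h)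
  omega

theorem pvFindS_alt_eq (L : List String) (r : Nat) : pvFindS_alt L r = pvFindS L r := by
  induction L generalizing r with
  | nil => rfl
  | cons row rest ih => simp [pvFindS_alt, pvFindS, ih]

theorem main_thm (grid : List String) (hpre : Pre_count_timelines grid) :
    count_timelines grid = count_timelines_alt grid := by
  rcases grid with _ | ⟨g0, gs⟩
  · rfl
  · simp only [count_timelines, count_timelines_alt, pvFindS_alt_eq]
    by_cases h0 : g0.toList.length = 0
    · have hcond : ((g0 :: gs).length = 0 ∨ (if (g0 :: gs).length = 0 then (0:Int) else PySem.Str.len (g0 :: gs).headI) = 0) := by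
        right
        rw [if_neg (by simp)]
        simp [PySem.Str.len_eq, h0]
      rw [if_pos hcond, if_pos hcond]
    · have hcolseq : (if (g0 :: gs).length = 0 then (0:Int) else PySem.Str.len (g0 :: gs).headI) = ((g0.toList.length : Nat) : Int) := by
        rw [if_neg (by simp)]
        simp [PySem.Str.len_eq]
      rw [hcolseq]
      have hbad : ¬((g0 :: gs).length = 0 ∨ ((g0.toList.length : Nat) : Int) = 0) := by
        rintro (h | h)
        · simp at h
        · omega
      rw [if_neg hbad, if_neg hbad]
      rcases hpre with h | h | ⟨hi, hsclt, hbelow⟩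
      · simp at h
      · exact absurd (by simp at h ⊢; simp [h]) h0
      · set i := (g0 :: gs).findIdx (fun row => PySem.Str.find row "S" != -1) with hidef
        set srow := (g0 :: gs).getD i "" with hsrow
        have hfs : pvFindS (g0 :: gs) 0 = some (i, PySem.Str.find srow "S") := by
          simpa using (pvFindS_idx (g0 :: gs) 0).1 hi
        rw [hfs]
        dsimp only
        have hp : PySem.Str.find srow "S" ≠ -1 := by
          have := List.findIdx_getElem (p := fun row => PySem.Str.find row "S" != -1)
            (xs := g0 :: gs) (w := hi)
          rw [hsrow, List.getD_eq_getElem?_getD, List.getElem?_eq_getElem hi]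
          simpa using this
        obtain ⟨hsc0, _⟩ := pvFind_bounds srow _ rfl hp
        have hsclt' : PySem.Str.find srow "S" < ((g0.toList.length : Nat) : Int) := by
          simpa [hsrow, hidef] using hsclt
        have hdroplen : ∀ s ∈ (g0 :: gs).drop (i + 1), ((g0.toList.length : Nat) : Int).toNat ≤ s.toList.length := by
          intro s hs
          have := hbelow s (by simpa [hidef] using hs)
          simp at this ⊢
          omega
        have hit : (PySem.Dict.ofList [(PySem.Str.find srow "S", (1:Int))]).items
            = [(PySem.Str.find srow "S", 1)] := rfl
        have hkeys : (PySem.Dict.ofList [(PySem.Str.find srow "S", (1:Int))]).keys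
            = [PySem.Str.find srow "S"] := rfl
        rw [pvRunRowsA_eq _ _ hdroplen (PySem.Dict.ofList [(PySem.Str.find srow "S", 1)]) 0
             (by rw [hkeys]; simp)
             (by intro p hp'; rw [hit] at hp'; simp at hp'; subst hp'; exact ⟨hsc0, hsclt'⟩)]
        rw [pvFoldrB_eq _ (by omega) _ hdroplen _ hsc0 (by omega)]
        rw [hit, pvTot_cons, pvTot_nil]
        ring

-- ===== VERDICT (by name: the statement is the Claim_ definition above) =====
theorem count_timelines_spec : Claim_equal_count_timelines := by
  intro grid _ hpre
  unfold Spec_count_timelines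
  exact main_thm grid hpre
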